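-- pv_equiv track=rewrite | github.com/drgoodnight/reef-doser-2pump | main.py | unquote_plus
-- ===== SOURCE A (Python) =====
-- def unquote_plus(s):
--     """Decode form-urlencoded strings: '+' -> space, %xx -> char."""
--     s = s.replace("+", " ")
--     out = ""
--     i = 0
--     while i < len(s):
--         if s[i] == "%" and i + 2 < len(s):
--             try:
--                 out += chr(int(s[i+1:i+3], 16))
--                 i += 3
--                 continue
--             except:
--                 pass
--         out += s[i]
--         i += 1
--     return out
-- ===== SOURCE B (Python) =====
-- def unquote_plus(s):
--     """Decode form-urlencoded strings: '+' -> space, %xx -> char."""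
--     s = s.replace("+", " ")
--     bits = s.split("%")
--     out = [bits[0]]
--     for chunk in bits[1:]:
--         if len(chunk) >= 2:
--             try:
--                 out.append(chr(int(chunk[:2], 16)) + chunk[2:])
--             except Exception:
--                 out.append("%" + chunk)
--         else:
--             out.append("%" + chunk)
--     return "".join(out)
-- ===== Notes on version B (the rewrite author's own statement) =====
-- stated objective: faster
-- what changed: B replaces A's character-by-character index scan (with its i+=3/i+=1 bookkeeping and per-char string concatenation) by the standard split-based decoder: one str.split on the escape character, decode the first two characters of each later chunk, and join the pieces.
import Mathlib
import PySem

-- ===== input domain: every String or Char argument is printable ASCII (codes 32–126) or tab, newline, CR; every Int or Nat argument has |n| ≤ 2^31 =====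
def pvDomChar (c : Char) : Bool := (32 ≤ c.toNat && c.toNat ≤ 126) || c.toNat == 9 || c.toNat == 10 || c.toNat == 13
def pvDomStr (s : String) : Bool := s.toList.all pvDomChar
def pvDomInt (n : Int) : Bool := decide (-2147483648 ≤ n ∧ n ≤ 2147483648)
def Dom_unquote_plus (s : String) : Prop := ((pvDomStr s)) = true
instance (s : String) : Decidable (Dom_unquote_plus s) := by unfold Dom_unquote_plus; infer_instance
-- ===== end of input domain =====

-- B decodes by one split on '%' plus a per-chunk decode instead of A's index scan; return values
-- are proved equal on all inputs (the Dom hypothesis is not even needed by the proof).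

-- Shared model of Python's `chr(int(cs, 16))` on a TWO-character slice, under a `try/except`
-- that turns any exception into `none`.  Exact on the printable-ASCII+tab/newline/CR domain
-- (checked exhaustively over all such pairs against CPython): two hex digits; one hex digit
-- with whitespace on the other side (int strips whitespace); '-0' (int('-0',16)=0, chr ok),
-- while '-d' for d≠0 parses to a negative so chr raises; everything else raises in int.
-- ('+' cannot occur: both programs replace '+' by ' ' first.)
def pvHexVal? (c : Char) : Option Nat :=
  if '0' ≤ c ∧ c ≤ '9' then some (c.toNat - 48)
  else if 'a' ≤ c ∧ c ≤ 'f' then some (c.toNat - 87)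
  else if 'A' ≤ c ∧ c ≤ 'F' then some (c.toNat - 55)
  else none

def pvIsWs (c : Char) : Bool := c = ' ' || c = '\t' || c = '\n' || c = '\r'

def pvDecode2? (a b : Char) : Option Char :=
  match pvHexVal? a, pvHexVal? b with
  | some x, some y => some (Char.ofNat (16 * x + y))
  | some x, none   => if pvIsWs b then some (Char.ofNat x) else none
  | none,   some y =>
      if a = '-' then (if y = 0 then some (Char.ofNat 0) else none)
      else if pvIsWs a then some (Char.ofNat y) else none
  | none,   none   => none

-- ===== PORT A =====
-- A's while loop over index i, ported as structural recursion over the character list: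
-- at '%' with two more characters, try to decode s[i+1:i+3] (advance by 3 on success),
-- otherwise copy the character and advance by 1.
def pvScanA : List Char → List Char
  | [] => []
  | '%' :: a :: b :: r2 =>
    (match pvDecode2? a b with
     | some ch => ch :: pvScanA r2
     | none => '%' :: pvScanA (a :: b :: r2))
  | c :: rest => c :: pvScanA rest

def unquote_plus (s : String) : String :=
  String.ofList (pvScanA (PySem.Str.replace s "+" " ").toList)

-- ===== PORT B =====
-- per-chunk decode of Source B's loop body: chunks of length ≥ 2 try chr(int(chunk[:2],16)) + chunk[2:],
-- anything else (or a failed decode) yields '%' + chunk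
def pvDecodeChunk (chunk : List Char) : List Char :=
  match chunk with
  | a :: b :: rest =>
    match pvDecode2? a b with
    | some c => c :: rest
    | none => '%' :: chunk
  | _ => '%' :: chunk

def unquote_plus_alt (s : String) : String :=
  let bits := PySem.Chars.splitOn (PySem.Str.replace s "+" " ").toList ['%']
  match bits with
  | [] => ""   -- unreachable: str.split never returns an empty list
  | b0 :: rest => String.ofList (rest.foldl (fun acc chunk => acc ++ pvDecodeChunk chunk) b0)

-- ===== PRECONDITION & SPEC =====
def Spec_unquote_plus (s : String) (out : String) : Prop := out = unquote_plus_alt s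
instance (s : String) (out : String) : Decidable (Spec_unquote_plus s out) := by unfold Spec_unquote_plus; infer_instance

-- ===== CLAIM (what is proved, stated in full; the proofs are below) =====
def Claim_equal_unquote_plus : Prop := ∀ (s : String), Dom_unquote_plus s → Spec_unquote_plus s (unquote_plus s)

-- ===== LEMMAS AND PROOFS =====

-- proof-side head/tail form of splitting at '%'
def pvSplit : List Char → List Char × List (List Char)
  | [] => ([], [])
  | c :: t =>
    let p := pvSplit t
    if c = '%' then ([], p.1 :: p.2) else (c :: p.1, p.2)

theorem pvDecode2?_pct_left (b : Char) : pvDecode2? '%' b = none := by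
  have h : pvHexVal? '%' = none := by decide
  have hw : pvIsWs '%' = false := by decide
  have hm : ('%' : Char) ≠ '-' := by decide
  unfold pvDecode2?; rw [h]
  rcases hb : pvHexVal? b with _ | y <;> simp [hw, hm]

theorem pvDecode2?_pct_right (a : Char) : pvDecode2? a '%' = none := by
  have h : pvHexVal? '%' = none := by decide
  have hw : pvIsWs '%' = false := by decide
  unfold pvDecode2?; rw [h]
  rcases ha : pvHexVal? a with _ | x <;> simp [hw]

theorem pvChunkNone (a b : Char) (r : List Char) (hn : pvDecode2? a b = none) :
    pvDecodeChunk (pvSplit (a :: b :: r)).1 = '%' :: (pvSplit (a :: b :: r)).1 := by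
  by_cases ha : a = '%'
  · simp [pvSplit, ha, pvDecodeChunk]
  · by_cases hb : b = '%'
    · simp [pvSplit, ha, hb, pvDecodeChunk]
    · simp [pvSplit, ha, hb, pvDecodeChunk, hn]

theorem pvSplit_pct (t : List Char) :
    pvSplit ('%' :: t) = ([], (pvSplit t).1 :: (pvSplit t).2) := by simp [pvSplit]

theorem pvSplit_cons_ne (c : Char) (t : List Char) (hc : c ≠ '%') :
    pvSplit (c :: t) = (c :: (pvSplit t).1, (pvSplit t).2) := by simp [pvSplit, hc]

theorem pvScanA_cons_ne (c : Char) (t : List Char) (hc : c ≠ '%') :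
    pvScanA (c :: t) = c :: pvScanA t := by
  rw [pvScanA.eq_def]
  split
  · rename_i heq; cases heq
  · rename_i heq; injection heq with h1 h2; exact absurd h1 hc
  · rename_i heq; injection heq with h1 h2; rw [h1, h2]

theorem pvScanA_pct3 (a b : Char) (r : List Char) :
    pvScanA ('%' :: a :: b :: r) =
      (match pvDecode2? a b with
       | some ch => ch :: pvScanA r
       | none => '%' :: pvScanA (a :: b :: r)) := rfl

theorem pvMain (l : List Char) :
    pvScanA l = (pvSplit l).1 ++ ((pvSplit l).2.map pvDecodeChunk).flatten := by
  rcases l with _ | ⟨c, t⟩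
  · simp [pvScanA, pvSplit]
  · by_cases hc : c = '%'
    · subst hc
      match t with
      | [] => decide
      | [a] =>
        by_cases ha : a = '%'
        · subst ha; decide
        · rw [show pvScanA ['%', a] = '%' :: pvScanA [a] from rfl, pvScanA_cons_ne a [] ha,
            pvSplit_pct, pvSplit_cons_ne a [] ha]
          simp [pvScanA, pvSplit, pvDecodeChunk]
      | a :: b :: r =>
        rcases hd : pvDecode2? a b with _ | ch
        · have ih := pvMain (a :: b :: r)
          rw [pvScanA_pct3, hd, ih, pvSplit_pct]
          simp only [List.map_cons, List.flatten_cons, List.nil_append]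
          rw [pvChunkNone a b r hd]
          simp
        · have ha : a ≠ '%' := fun h => by rw [h, pvDecode2?_pct_left] at hd; simp at hd
          have hb : b ≠ '%' := fun h => by rw [h, pvDecode2?_pct_right] at hd; simp at hd
          have ih := pvMain r
          rw [pvScanA_pct3, hd, ih, pvSplit_pct, pvSplit_cons_ne a (b :: r) ha,
            pvSplit_cons_ne b r hb]
          simp [pvDecodeChunk, hd]
    · rw [pvScanA_cons_ne c t hc, pvMain t, pvSplit_cons_ne c t hc]
      simp
termination_by l.length

theorem pvGo_spec (fuel : Nat) : ∀ (l cur : List Char) (accs : List (List Char)),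
    l.length < fuel →
    PySem.Chars.splitOn.go ['%'] fuel l cur accs =
      accs.reverse ++ (cur.reverse ++ (pvSplit l).1) :: (pvSplit l).2 := by
  induction fuel with
  | zero => intro l cur accs h; omega
  | succ f ih =>
    intro l cur accs h
    cases l with
    | nil => rw [PySem.Chars.splitOn.go]; simp [pvSplit]; omega
    | cons c rest =>
      rw [PySem.Chars.splitOn.go.eq_def]
      by_cases hc : c = '%'
      · subst hc
        simp only [List.isPrefixOf, List.length_cons] at *
        simp only [show (('%':Char) == '%') = true from by decide, Bool.true_and,
          if_true, List.length_nil, Nat.zero_add, List.drop_succ_cons, List.drop_zero]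
        rw [ih rest [] ((List.reverse cur) :: accs) (by omega)]
        simp [pvSplit]
      · have : (['%'].isPrefixOf (c :: rest)) = false := by
          simp [List.isPrefixOf]; exact fun h => absurd h.symm hc
        simp only [this]
        rw [ih rest (c :: cur) accs (by simp at h ⊢; omega)]
        simp [pvSplit, hc]

theorem pvSplitOn_eq (l : List Char) :
    PySem.Chars.splitOn l ['%'] = (pvSplit l).1 :: (pvSplit l).2 := by
  rw [PySem.Chars.splitOn, pvGo_spec (l.length + 1) l [] [] (by omega)]
  simp

-- ===== VERDICT (by name: the statement is the Claim_ definition above) =====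
theorem unquote_plus_spec : Claim_equal_unquote_plus := by
  intro s _
  unfold Spec_unquote_plus unquote_plus unquote_plus_alt
  rw [pvSplitOn_eq]
  simp only [PySem.List.foldl_append_eq_flatMap, List.flatMap_def]
  rw [pvMain]
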